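-- pv_equiv track=rewrite | github.com/TheFeshy/mp3utensil | mp3utensil/id3v2common.py | _read_various
-- ===== SOURCE A (Python) =====
-- def _read_various(pos, data, count, shift=8):
--     """Used to read syncsafe or normal multibyte ints from ID3v2 files.
--        Some versions use  normal ints, some use ints with the most significant
--        bit zeroed and ignored.  Example:  b'0xxxxxxx', where 00000001 00000000
--        is 128 because the most significant bit of the lower byte is skipped."""
--     mask = 255
--     mask = ((mask << shift) & 255)
--     value = 0
--     if sum([x & mask for x in data[pos:pos+count]]): #Verify no unsync bits set
--         raise ValueError("Illegal bytes in ID3v2 size headers")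
--     for offset in range(count):
--         value += (data[pos+offset] << (((count - offset)-1) * shift))
--     return value
-- ===== SOURCE B (Python) =====
-- def _read_various(pos, data, count, shift=8):
--     """Divide-and-conquer: recursively read each half of the byte range and
--        combine the halves with one shift, instead of a linear offset loop."""
--     mask = (255 << shift) & 255
--     if sum(x & mask for x in data[pos:pos+count]):  # verify no unsync bits set
--         raise ValueError("Illegal bytes in ID3v2 size headers")
--     def read(lo, n):
--         if n <= 0:
--             return 0
--         if n == 1:
--             return data[pos + lo]
--         half = n // 2
--         return (read(lo, half) << ((n - half) * shift)) + read(lo + half, n - half)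
--     return read(0, count)
-- ===== Notes on version B (the rewrite author's own statement) =====
-- stated objective: alternative
-- what changed: Replaces A's linear loop summing each byte shifted by an independently computed positional weight with a divide-and-conquer recursion that reads each half of the byte range and joins the halves with a single shift.
import Mathlib
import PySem

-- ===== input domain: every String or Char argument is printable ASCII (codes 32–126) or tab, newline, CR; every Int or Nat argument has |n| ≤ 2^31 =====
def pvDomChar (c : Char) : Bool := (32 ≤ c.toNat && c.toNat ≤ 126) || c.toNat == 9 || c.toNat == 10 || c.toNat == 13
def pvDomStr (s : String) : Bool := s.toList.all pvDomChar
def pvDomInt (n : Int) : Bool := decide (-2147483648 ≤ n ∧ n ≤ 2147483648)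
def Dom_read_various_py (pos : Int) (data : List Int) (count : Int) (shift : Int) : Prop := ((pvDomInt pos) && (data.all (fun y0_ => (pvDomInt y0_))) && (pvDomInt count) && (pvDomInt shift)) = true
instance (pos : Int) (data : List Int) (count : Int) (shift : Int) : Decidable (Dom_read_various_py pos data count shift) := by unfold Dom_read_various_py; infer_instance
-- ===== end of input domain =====

-- B replaces A's positional-weight sum loop by a divide-and-conquer recursion over the byte
-- range (alternative decomposition; same cost). A's raising branches (negative shift,
-- unsync-bit check, IndexError) are excluded by Pre_ below.

-- ===== PORT A =====
-- A: value = sum over offsets of data[pos+offset] << ((count-offset-1)*shift)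
def read_various_py (pos : Int) (data : List Int) (count : Int) (shift : Int) : Int :=
  (PySem.List.pyRange 0 count 1).foldl
    (fun value offset =>
      value + (PySem.List.pyGetD data (pos + offset) 0) <<< ((count - offset - 1) * shift).toNat) 0

-- ===== PORT B =====
-- B: read(lo, n): halves of the range read recursively, joined by one shift.
def rvRead (pos : Int) (data : List Int) (shift : Int) (lo : Int) (n : Int) : Int :=
  if _h0 : n ≤ 0 then 0
  else if _h1 : n = 1 then PySem.List.pyGetD data (pos + lo) 0
  else
    let half := PySem.Int.floordiv n 2
    (rvRead pos data shift lo half) <<< (((n - half) * shift).toNat)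
      + rvRead pos data shift (lo + half) (n - half)
termination_by n.toNat
decreasing_by
  · have := PySem.Int.floordiv_eq_ediv_of_pos (a := n) (b := 2) (by omega)
    omega
  · have := PySem.Int.floordiv_eq_ediv_of_pos (a := n) (b := 2) (by omega)
    omega

def read_various_py_alt (pos : Int) (data : List Int) (count : Int) (shift : Int) : Int :=
  rvRead pos data shift 0 count

-- ===== PRECONDITION & SPEC =====
-- Pre_ admits exactly the inputs on which the Python returns: shift nonnegative (else '255 << shift'
-- raises ValueError), the unsync-mask check passes (each sliced byte ANDs to 0 against the mask
-- (255<<shift)&255, written in the closed form 0 / 256-2^shift, so the nonnegative sum is 0 — else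
-- an explicit ValueError), and every index pos+offset used by the loop is in range in Python's
-- sense, stated by its interval endpoints (else IndexError).
def Pre_read_various_py (pos : Int) (data : List Int) (count : Int) (shift : Int) : Prop :=
  0 ≤ shift ∧
  (∀ x ∈ PySem.List.slice data (some pos) (some (pos + count)),
      PySem.Int.band x (if 8 ≤ shift then 0 else 256 - 2 ^ shift.toNat) = 0) ∧
  (count ≤ 0 ∨ (PySem.Raise.InRange data.length pos ∧ PySem.Raise.InRange data.length (pos + count - 1)))
instance (pos : Int) (data : List Int) (count : Int) (shift : Int) : Decidable (Pre_read_various_py pos data count shift) := by unfold Pre_read_various_py; infer_instance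

def pvWitness_read_various_py : Int × List Int × Int × Int := (0, [1, 2], 2, 8)

def Spec_read_various_py (pos : Int) (data : List Int) (count : Int) (shift : Int) (out : Int) : Prop := out = read_various_py_alt pos data count shift
instance (pos : Int) (data : List Int) (count : Int) (shift : Int) (out : Int) : Decidable (Spec_read_various_py pos data count shift out) := by unfold Spec_read_various_py; infer_instance

-- ===== CLAIM (what is proved, stated in full; the proofs are below) =====
def Claim_equal_read_various_py : Prop := ∀ (pos : Int) (data : List Int) (count : Int) (shift : Int), Dom_read_various_py pos data count shift → Pre_read_various_py pos data count shift → Spec_read_various_py pos data count shift (read_various_py pos data count shift)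

-- ===== LEMMAS AND PROOFS =====

-- A's loop is a plain sum of shifted terms.
theorem foldl_add_shift (f : Nat → Int) (g : Nat → Nat) (n : Nat) :
    (List.range n).foldl (fun (v : Int) k => v + (f k) <<< (g k)) 0
      = ∑ k ∈ Finset.range n, f k * 2 ^ (g k) := by
  induction n with
  | zero => simp
  | succ n ih =>
    rw [List.range_succ, List.foldl_append, Finset.sum_range_succ, ih]
    simp [Int.shiftLeft_eq]

-- B's recursion computes the big-endian sum of the n bytes starting at pos+lo.
theorem rvRead_sum (pos : Int) (data : List Int) (shift : Int) (hs : 0 ≤ shift)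
    (n : Nat) (lo : Int) :
    rvRead pos data shift lo (n : Int)
      = ∑ k ∈ Finset.range n,
          PySem.List.pyGetD data (pos + lo + k) 0 * (2 : Int) ^ ((n - 1 - k) * shift.toNat) := by
  induction n using Nat.strong_induction_on generalizing lo with
  | _ n ih =>
    match n with
    | 0 => rw [rvRead]; simp
    | 1 => rw [rvRead]; simp
    | (m + 2) =>
      rw [rvRead]
      have hn0 : ¬ ((m + 2 : Int) ≤ 0) := by omega
      have hn1 : ¬ ((m + 2 : Int) = 1) := by omega
      rw [dif_neg (by exact_mod_cast hn0), dif_neg (by exact_mod_cast hn1)]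
      have hfd : PySem.Int.floordiv ((m + 2 : Nat) : Int) 2 = (((m + 2) / 2 : Nat) : Int) := by
        rw [PySem.Int.floordiv_eq_ediv_of_pos (by omega)]
        omega
      set h := (m + 2) / 2 with hh
      set r := (m + 2) - h with hr
      have hhlt : h < m + 2 := by omega
      have hrlt : r < m + 2 := by omega
      have hhpos : 1 ≤ h := by omega
      have hsum : h + r = m + 2 := by omega
      simp only [hfd]
      rw [show ((m + 2 : Nat) : Int) - ((h : Nat) : Int) = (r : Int) from by push_cast; omega]
      rw [ih h hhlt lo, ih r hrlt (lo + (h : Int))]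
      have hshift : (((r : Int)) * shift).toNat = r * shift.toNat := by
        obtain ⟨s, rfl⟩ := Int.eq_ofNat_of_zero_le hs
        exact_mod_cast Int.toNat_natCast (n := r * s)
      rw [hshift, Int.shiftLeft_eq, Finset.sum_mul]
      rw [show m + 2 = h + r from hsum.symm, Finset.sum_range_add]
      congr 1
      · refine Finset.sum_congr rfl ?_
        intro k hk
        rw [Finset.mem_range] at hk
        rw [mul_assoc, ← pow_add, ← add_mul,
          show (h - 1 - k) + r = h + r - 1 - k from by omega]
      · refine Finset.sum_congr rfl ?_
        intro j hj
        rw [Finset.mem_range] at hj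
        have h1 : pos + (lo + (h : Int)) + (j : Int) = pos + lo + ((h + j : Nat) : Int) := by
          push_cast; ring
        have h2 : r - 1 - j = h + r - 1 - (h + j) := by omega
        rw [h1, h2]

theorem read_various_eq (pos : Int) (data : List Int) (count : Int) (shift : Int)
    (hs : 0 ≤ shift) :
    read_various_py pos data count shift = read_various_py_alt pos data count shift := by
  unfold read_various_py read_various_py_alt
  by_cases hc : count ≤ 0
  · rw [PySem.List.pyRange_one_eq_nil hc, rvRead]
    simp [hc]
  · rw [Int.not_le] at hc
    have hcc : count = ((count.toNat : Nat) : Int) := by omega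
    rw [PySem.List.pyRange_one]
    simp only [List.foldl_map, zero_add, sub_zero]
    rw [foldl_add_shift (fun k => PySem.List.pyGetD data (pos + (k : Int)) 0)
          (fun k => ((count - (k : Int) - 1) * shift).toNat)]
    rw [hcc, rvRead_sum pos data shift hs count.toNat 0]
    refine Finset.sum_congr rfl ?_
    intro k hk
    rw [Finset.mem_range] at hk
    have he : (((count.toNat : Int) - (k : Int) - 1) * shift).toNat
        = (count.toNat - 1 - k) * shift.toNat := by
      obtain ⟨s, rfl⟩ := Int.eq_ofNat_of_zero_le hs
      rw [show ((count.toNat : Int) - (k : Int) - 1) = ((count.toNat - 1 - k : Nat) : Int) from by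
        omega]
      exact_mod_cast Int.toNat_natCast (n := (count.toNat - 1 - k) * s)
    rw [he, add_zero]

-- ===== VERDICT (by name: the statement is the Claim_ definition above) =====
theorem read_various_py_spec : Claim_equal_read_various_py := by
  intro pos data count shift _ hpre
  unfold Spec_read_various_py
  exact read_various_eq pos data count shift hpre.1
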